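-- pv_equiv track=rewrite | github.com/dahlkkim9-kgs/spark-sql-optimizer | backend/core/formatter_v5_sqlglot.py | _protect_comment_slash_star
-- ===== SOURCE A (Python) =====
-- def _protect_comment_slash_star(sql: str) -> tuple:
--     """保护 -- 注释内的 /* 和 */ 文本，防止 sqlglot 误解析。
--
--     将 -- 注释内的 /* 替换为 ___CSS___ ，*/ 替换为 ___CSE___。
--     跳过字符串和块注释内的内容。
--     """
--     result = []
--     protect_map = {}
--     counter = 0
--     i = 0
--     in_str = False
--     qc = None
--     in_block_comment = False
--
--     while i < len(sql):
--         ch = sql[i]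
--
--         if in_block_comment:
--             result.append(ch)
--             if ch == '*' and i + 1 < len(sql) and sql[i + 1] == '/':
--                 in_block_comment = False
--             i += 1
--             continue
--
--         if in_str:
--             result.append(ch)
--             if ch == '\\' and i + 1 < len(sql):
--                 result.append(sql[i + 1])
--                 i += 2
--                 continue
--             if ch == qc:
--                 in_str = False
--             i += 1
--             continue
--
--         if ch in ("'", '"'):
--             in_str = True
--             qc = ch
--             result.append(ch)
--             i += 1
--             continue
--
--         if ch == '/' and i + 1 < len(sql) and sql[i + 1] == '*':
--             in_block_comment = True
--             result.append(ch)
--             i += 1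
--             continue
--
--         # 检测 -- 行注释
--         if ch == '-' and i + 1 < len(sql) and sql[i + 1] == '-':
--             # 输出 --
--             result.append(ch)
--             i += 1
--             result.append(ch)
--             i += 1
--             # 处理注释内容直到行尾
--             while i < len(sql) and sql[i] not in ('\n', '\r'):
--                 c2 = sql[i]
--                 if c2 == '/' and i + 1 < len(sql) and sql[i + 1] == '*':
--                     ph = f'___CSS{counter}___'
--                     protect_map[ph] = '/*'
--                     result.append(ph)
--                     counter += 1
--                     i += 2
--                 elif c2 == '*' and i + 1 < len(sql) and sql[i + 1] == '/':
--                     ph = f'___CSS{counter}___'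
--                     protect_map[ph] = '*/'
--                     result.append(ph)
--                     counter += 1
--                     i += 2
--                 else:
--                     result.append(c2)
--                     i += 1
--             continue
--
--         result.append(ch)
--         i += 1
--
--     return ''.join(result), protect_map
-- ===== SOURCE B (Python) =====
-- def _scan_string(sql, i, qc):
--     # index one past the string literal body+closing quote (unterminated: end)
--     n = len(sql)
--     while i < n:
--         if sql[i] == '\\' and i + 1 < n:
--             i += 2
--         elif sql[i] == qc:
--             return i + 1
--         else:
--             i += 1
--     return n
--
-- def _scan_block(sql, i):
--     # block comment: stop right after the closing '*'; the '/' is rescanned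
--     # at top level (it is copied verbatim either way)
--     n = len(sql)
--     while i < n:
--         if sql[i] == '*' and i + 1 < n and sql[i + 1] == '/':
--             return i + 1
--         i += 1
--     return n
--
-- def _scan_line(sql, i):
--     # index of the line terminator (or end of input)
--     n = len(sql)
--     while i < n and sql[i] not in ('\n', '\r'):
--         i += 1
--     return i
--
-- def _tokenize(sql):
--     # phase 1: split into verbatim segments and line-comment bodies
--     toks = []
--     n = len(sql)
--     i = 0
--     while i < n:
--         ch = sql[i]
--         if ch in ("'", '"'):
--             j = _scan_string(sql, i + 1, ch)
--             toks.append(('raw', sql[i:j])); i = j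
--         elif ch == '/' and i + 1 < n and sql[i + 1] == '*':
--             j = _scan_block(sql, i + 1)
--             toks.append(('raw', sql[i:j])); i = j
--         elif ch == '-' and i + 1 < n and sql[i + 1] == '-':
--             j = _scan_line(sql, i + 2)
--             toks.append(('cmt', sql[i + 2:j])); i = j
--         else:
--             toks.append(('raw', ch)); i += 1
--     return toks
--
-- def _protect_comment_slash_star(sql: str) -> tuple:
--     # phase 2: copy raw segments, rewrite '/*' and '*/' in comment bodies
--     parts = []
--     pmap = {}
--     counter = 0
--     for kind, text in _tokenize(sql):
--         if kind == 'raw':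
--             parts.append(text)
--         else:
--             parts.append('--')
--             k = 0
--             while k < len(text):
--                 two = text[k:k + 2]
--                 if two == '/*' or two == '*/':
--                     ph = f'___CSS{counter}___'
--                     pmap[ph] = two
--                     parts.append(ph)
--                     counter += 1
--                     k += 2
--                 else:
--                     parts.append(text[k])
--                     k += 1
--     return ''.join(parts), pmap
-- ===== Notes on version B (the rewrite author's own statement) =====
-- stated objective: alternative
-- what changed: Replaces A's single index-driven while-loop with mode flags (in_str/in_block_comment plus a nested comment loop) by a two-phase design: a tokenizer that splits the input into verbatim segments (strings, block comments, plain text) and line-comment bodies via dedicated scanners, then a render pass that copies raw segments and rewrites /* and */ in comment bodies to placeholders.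
import Mathlib
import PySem

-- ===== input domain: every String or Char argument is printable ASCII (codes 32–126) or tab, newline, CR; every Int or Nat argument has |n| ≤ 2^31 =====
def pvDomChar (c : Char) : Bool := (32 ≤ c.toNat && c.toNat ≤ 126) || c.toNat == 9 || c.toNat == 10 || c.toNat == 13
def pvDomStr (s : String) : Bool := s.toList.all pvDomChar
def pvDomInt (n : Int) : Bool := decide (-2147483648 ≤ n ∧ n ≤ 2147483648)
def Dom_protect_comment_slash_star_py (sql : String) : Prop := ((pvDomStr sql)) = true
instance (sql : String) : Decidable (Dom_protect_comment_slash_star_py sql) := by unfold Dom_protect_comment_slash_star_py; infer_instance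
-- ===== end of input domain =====

-- B replaces A's single while-loop with mode flags by a two-phase tokenizer
-- (split into verbatim segments / line-comment bodies, then render); objective: alternative.


-- shared helper: the placeholder string f'___CSS{counter}___'
def pcssPh (k : Nat) : String := "___CSS" ++ toString k ++ "___"

-- ===== PORT A =====
-- A is one while-loop over an index with mode flags (in_block_comment / in_str /
-- the inner '--' loop); each mode is one function here, 'continue' = tail call.
mutual
-- normal mode (all flags false)
def goNormA : List Char → List Char → List (String × String) → Nat → String × (List (String × String))
  | [], acc, m, _ => (String.ofList acc, m)
  | c :: cs, acc, m, k =>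
    if c = '\'' ∨ c = '"' then goStrA cs c (acc ++ [c]) m k
    else if c = '/' ∧ cs.head? = some '*' then goBlkA cs (acc ++ [c]) m k
    else if c = '-' ∧ cs.head? = some '-' then goCmtA cs.tail (acc ++ [c, '-']) m k
    else goNormA cs (acc ++ [c]) m k
termination_by cs _ _ _ => 2 * cs.length
decreasing_by all_goals first | (simp_all [List.length_tail]; omega) | simp_all [List.length_tail]
-- in_str = True, qc the opening quote
def goStrA : List Char → Char → List Char → List (String × String) → Nat → String × (List (String × String))
  | [], _, acc, m, _ => (String.ofList acc, m)
  | c :: cs, qc, acc, m, k =>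
    if c = '\\' ∧ cs ≠ [] then goStrA cs.tail qc (acc ++ [c] ++ cs.take 1) m k
    else if c = qc then goNormA cs (acc ++ [c]) m k
    else goStrA cs qc (acc ++ [c]) m k
termination_by cs _ _ _ _ => 2 * cs.length
decreasing_by all_goals first | (simp_all [List.length_tail]; omega) | simp_all [List.length_tail]
-- in_block_comment = True
def goBlkA : List Char → List Char → List (String × String) → Nat → String × (List (String × String))
  | [], acc, m, _ => (String.ofList acc, m)
  | c :: cs, acc, m, k =>
    if c = '*' ∧ cs.head? = some '/' then goNormA cs (acc ++ [c]) m k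
    else goBlkA cs (acc ++ [c]) m k
termination_by cs _ _ _ => 2 * cs.length
decreasing_by all_goals first | (simp_all [List.length_tail]; omega) | simp_all [List.length_tail]
-- the inner 'while i < len(sql) and sql[i] not in (\n,\r)' loop after '--'
def goCmtA : List Char → List Char → List (String × String) → Nat → String × (List (String × String))
  | [], acc, m, _ => goNormA [] acc m 0
  | c :: cs, acc, m, k =>
    if c = '\n' ∨ c = '\r' then goNormA (c :: cs) acc m k
    else if c = '/' ∧ cs.head? = some '*' then
      goCmtA cs.tail (acc ++ (pcssPh k).toList) (m ++ [(pcssPh k, "/*")]) (k + 1)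
    else if c = '*' ∧ cs.head? = some '/' then
      goCmtA cs.tail (acc ++ (pcssPh k).toList) (m ++ [(pcssPh k, "*/")]) (k + 1)
    else goCmtA cs (acc ++ [c]) m k
termination_by cs _ _ _ => 2 * cs.length + 1
decreasing_by all_goals first | (simp_all [List.length_tail]; omega) | simp_all [List.length_tail]
end

def protect_comment_slash_star_py (sql : String) : String × (List (String × String)) :=
  goNormA sql.toList [] [] 0

-- ===== PORT B =====
-- B: phase 1 tokenizes into verbatim segments and line-comment bodies; phase 2 renders.

-- string literal: body+closing quote (backslash escapes; unterminated: to end)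
def scanStrB (qc : Char) : List Char → (List Char × List Char)
  | [] => ([], [])
  | c :: cs =>
    if c = '\\' ∧ cs ≠ [] then
      let p := scanStrB qc cs.tail; (c :: cs.take 1 ++ p.1, p.2)
    else if c = qc then ([c], cs)
    else let p := scanStrB qc cs; (c :: p.1, p.2)
termination_by cs => cs.length
decreasing_by
  all_goals first
    | (cases cs with
       | nil => simp_all
       | cons d ds => simp)
    | simp

-- block comment: stop right after the closing '*' ('/' is rescanned at top level)
def scanBlkB : List Char → (List Char × List Char)
  | [] => ([], [])
  | c :: cs =>
    if c = '*' ∧ cs.head? = some '/' then ([c], cs)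
    else let p := scanBlkB cs; (c :: p.1, p.2)

-- split at the line terminator
def scanLineB : List Char → (List Char × List Char)
  | [] => ([], [])
  | c :: cs =>
    if c = '\n' ∨ c = '\r' then ([], c :: cs)
    else let p := scanLineB cs; (c :: p.1, p.2)

theorem scanStrB_len (qc : Char) : ∀ cs : List Char, (scanStrB qc cs).2.length ≤ cs.length := by
  intro cs
  induction cs using scanStrB.induct qc with
  | case1 => simp [scanStrB]
  | case2 c cs h ih =>
      simp only [scanStrB, if_pos h]
      have := cs.length_tail
      simp at ih ⊢
      omega
  | case3 cs h => simp [scanStrB, h]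
  | case4 c cs h1 h2 ih => simp only [scanStrB, if_neg h1, if_neg h2]; simp; exact Nat.le_succ_of_le ih

theorem scanBlkB_len : ∀ cs : List Char, (scanBlkB cs).2.length ≤ cs.length := by
  intro cs
  induction cs using scanBlkB.induct with
  | case1 => simp [scanBlkB]
  | case2 c cs h => simp [scanBlkB, h]
  | case3 c cs h ih => simp only [scanBlkB, if_neg h]; simp; exact Nat.le_succ_of_le ih

theorem scanLineB_len : ∀ cs : List Char, (scanLineB cs).2.length ≤ cs.length := by
  intro cs
  induction cs using scanLineB.induct with
  | case1 => simp [scanLineB]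
  | case2 c cs h => simp [scanLineB, h]
  | case3 c cs h ih => simp only [scanLineB, if_neg h]; simp; exact Nat.le_succ_of_le ih

inductive TokB where
  | raw : List Char → TokB
  | cmt : List Char → TokB
deriving DecidableEq, Repr

def tokenizeB : List Char → List TokB
  | [] => []
  | c :: cs =>
    if c = '\'' ∨ c = '"' then
      let p := scanStrB c cs
      TokB.raw (c :: p.1) :: tokenizeB p.2
    else if c = '/' ∧ cs.head? = some '*' then
      let p := scanBlkB cs
      TokB.raw (c :: p.1) :: tokenizeB p.2
    else if c = '-' ∧ cs.head? = some '-' then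
      let p := scanLineB cs.tail
      TokB.cmt p.1 :: tokenizeB p.2
    else TokB.raw [c] :: tokenizeB cs
termination_by cs => cs.length
decreasing_by
  · have := scanStrB_len c cs; simp; omega
  · have := scanBlkB_len cs; simp; omega
  · have := scanLineB_len cs.tail; simp [List.length_tail] at *; omega
  · simp

-- rewrite '/*' and '*/' in a comment body to placeholders
def replCmtB : List Char → Nat → (List Char × List (String × String) × Nat)
  | [], k => ([], [], k)
  | c :: cs, k =>
    let two := (c :: cs).take 2
    if two = ['/', '*'] ∨ two = ['*', '/'] then
      let w : String := if c = '/' then "/*" else "*/"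
      let p := replCmtB cs.tail (k + 1)
      ((pcssPh k).toList ++ p.1, (pcssPh k, w) :: p.2.1, p.2.2)
    else
      let p := replCmtB cs k
      (c :: p.1, p.2)
termination_by cs _ => cs.length
decreasing_by all_goals (simp [List.length_tail]) <;> omega

def renderB : List TokB → Nat → (List Char × List (String × String))
  | [], _ => ([], [])
  | TokB.raw t :: ts, k => let p := renderB ts k; (t ++ p.1, p.2)
  | TokB.cmt b :: ts, k =>
    let q := replCmtB b k
    let p := renderB ts q.2.2
    ('-' :: '-' :: (q.1 ++ p.1), q.2.1 ++ p.2)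

def protect_comment_slash_star_py_alt (sql : String) : String × (List (String × String)) :=
  let r := renderB (tokenizeB sql.toList) 0
  (String.ofList r.1, r.2)

-- ===== PRECONDITION & SPEC =====
def Spec_protect_comment_slash_star_py (sql : String) (out : String × (List (String × String))) : Prop := out = protect_comment_slash_star_py_alt sql
instance (sql : String) (out : String × (List (String × String))) : Decidable (Spec_protect_comment_slash_star_py sql out) := by unfold Spec_protect_comment_slash_star_py; infer_instance

-- ===== CLAIM (what is proved, stated in full; the proofs are below) =====
def Claim_equal_protect_comment_slash_star_py : Prop := ∀ (sql : String), Dom_protect_comment_slash_star_py sql → Spec_protect_comment_slash_star_py sql (protect_comment_slash_star_py sql)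

-- ===== LEMMAS AND PROOFS =====

theorem goStrA_eq (qc : Char) : ∀ (cs acc : List Char) (m : List (String × String)) (k : Nat),
    goStrA cs qc acc m k = goNormA (scanStrB qc cs).2 (acc ++ (scanStrB qc cs).1) m k := by
  intro cs
  induction cs using scanStrB.induct qc with
  | case1 => intro acc m k; simp [goStrA, scanStrB, goNormA]
  | case2 c cs h ih =>
      intro acc m k
      simp only [goStrA, scanStrB, if_pos h, ih]
      simp
  | case3 cs h =>
      intro acc m k
      simp [goStrA, scanStrB, h]
  | case4 c cs h1 h2 ih =>
      intro acc m k
      simp only [goStrA, scanStrB, if_neg h1, if_neg h2, ih]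
      simp

theorem goBlkA_eq : ∀ (cs acc : List Char) (m : List (String × String)) (k : Nat),
    goBlkA cs acc m k = goNormA (scanBlkB cs).2 (acc ++ (scanBlkB cs).1) m k := by
  intro cs
  induction cs using scanBlkB.induct with
  | case1 => intro acc m k; simp [goBlkA, scanBlkB, goNormA]
  | case2 c cs h =>
      intro acc m k
      simp [goBlkA, scanBlkB, h]
  | case3 c cs h ih =>
      intro acc m k
      simp only [goBlkA, scanBlkB, if_neg h, ih]
      simp

theorem scanLineB_head : ∀ (cs : List Char) (d : Char), ((scanLineB cs).1).head? = some d → cs.head? = some d := by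
  intro cs d h
  cases cs with
  | nil => simp [scanLineB] at h
  | cons e es =>
      by_cases hn : e = '\n' ∨ e = '\r'
      · simp [scanLineB, hn] at h
      · simp [scanLineB, hn] at h
        simp [h]

theorem goCmtA_eq : ∀ (n : Nat) (cs : List Char), cs.length ≤ n → ∀ (acc : List Char) (m : List (String × String)) (k : Nat),
    goCmtA cs acc m k =
      goNormA (scanLineB cs).2 (acc ++ (replCmtB (scanLineB cs).1 k).1)
        (m ++ (replCmtB (scanLineB cs).1 k).2.1) (replCmtB (scanLineB cs).1 k).2.2 := by
  intro n
  induction n with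
  | zero =>
      intro cs hcs acc m k
      have : cs = [] := List.eq_nil_of_length_eq_zero (Nat.le_zero.mp hcs)
      subst this
      simp [goCmtA, scanLineB, replCmtB, goNormA]
  | succ n ih =>
      intro cs hcs acc m k
      match cs with
      | [] => simp [goCmtA, scanLineB, replCmtB, goNormA]
      | c :: cs =>
        by_cases hnl : c = '\n' ∨ c = '\r'
        · have h1 : goCmtA (c :: cs) acc m k = goNormA (c :: cs) acc m k := by
            simp [goCmtA, hnl]
          rw [h1]
          simp [scanLineB, hnl, replCmtB]
        · by_cases hop : c = '/' ∧ cs.head? = some '*'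
          · obtain ⟨hc, hd⟩ := hop
            cases cs with
            | nil => simp at hd
            | cons d cs2 =>
              simp at hd
              subst hd; subst hc
              have h1 : goCmtA ('/' :: '*' :: cs2) acc m k
                  = goCmtA cs2 (acc ++ (pcssPh k).toList) (m ++ [(pcssPh k, "/*")]) (k + 1) := by
                simp [goCmtA]
              rw [h1, ih cs2 (by simp at hcs; omega)]
              simp [scanLineB, replCmtB]
          · by_cases hcl : c = '*' ∧ cs.head? = some '/'
            · obtain ⟨hc, hd⟩ := hcl
              cases cs with
              | nil => simp at hd
              | cons d cs2 =>
                simp at hd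
                subst hd; subst hc
                have h1 : goCmtA ('*' :: '/' :: cs2) acc m k
                    = goCmtA cs2 (acc ++ (pcssPh k).toList) (m ++ [(pcssPh k, "*/")]) (k + 1) := by
                  simp [goCmtA]
                rw [h1, ih cs2 (by simp at hcs; omega)]
                simp [scanLineB, replCmtB]
            · have h1 : goCmtA (c :: cs) acc m k = goCmtA cs (acc ++ [c]) m k := by
                simp [goCmtA, hnl, hop, hcl]
              rw [h1, ih cs (by simp at hcs; omega)]
              have hhd : ∀ (x : Char), List.take 1 (scanLineB cs).1 = [x] → cs.head? = some x := by
                intro x hx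
                apply scanLineB_head
                cases h : (scanLineB cs).1 with
                | nil => rw [h] at hx; simp at hx
                | cons d L => rw [h] at hx; simp at hx; simp [hx]
              have hbody : ¬(c = '/' ∧ List.take 1 (scanLineB cs).1 = ['*'] ∨ c = '*' ∧ List.take 1 (scanLineB cs).1 = ['/']) := by
                rintro (⟨rfl, ht⟩ | ⟨rfl, ht⟩)
                · exact hop ⟨rfl, hhd _ ht⟩
                · exact hcl ⟨rfl, hhd _ ht⟩
              simp [scanLineB, hnl, replCmtB, hbody]

theorem goNormA_eq : ∀ (n : Nat) (cs : List Char), cs.length ≤ n → ∀ (acc : List Char) (m : List (String × String)) (k : Nat),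
    goNormA cs acc m k =
      (String.ofList (acc ++ (renderB (tokenizeB cs) k).1), m ++ (renderB (tokenizeB cs) k).2) := by
  intro n
  induction n with
  | zero =>
      intro cs hcs acc m k
      have : cs = [] := List.eq_nil_of_length_eq_zero (Nat.le_zero.mp hcs)
      subst this
      simp [goNormA, tokenizeB, renderB]
  | succ n ih =>
      intro cs hcs acc m k
      match cs with
      | [] => simp [goNormA, tokenizeB, renderB]
      | c :: cs =>
        by_cases hq : c = '\'' ∨ c = '"'
        · have h1 : goNormA (c :: cs) acc m k = goStrA cs c (acc ++ [c]) m k := by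
            simp [goNormA, hq]
          have hlen : (scanStrB c cs).2.length ≤ n := le_trans (scanStrB_len c cs) (by simp at hcs; omega)
          rw [h1, goStrA_eq, ih _ hlen]
          simp [tokenizeB, hq, renderB]
        · by_cases hb : c = '/' ∧ cs.head? = some '*'
          · have h1 : goNormA (c :: cs) acc m k = goBlkA cs (acc ++ [c]) m k := by
              simp [goNormA, hq, hb]
            have hlen : (scanBlkB cs).2.length ≤ n := le_trans (scanBlkB_len cs) (by simp at hcs; omega)
            rw [h1, goBlkA_eq, ih _ hlen]
            simp [tokenizeB, hq, hb, renderB]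
          · by_cases hcm : c = '-' ∧ cs.head? = some '-'
            · have h1 : goNormA (c :: cs) acc m k = goCmtA cs.tail (acc ++ [c, '-']) m k := by
                simp [goNormA, hq, hb, hcm]
              have hlen : (scanLineB cs.tail).2.length ≤ n := by
                have := scanLineB_len cs.tail
                have := cs.length_tail
                simp at hcs; omega
              rw [h1, goCmtA_eq cs.tail.length cs.tail (le_refl _)]
              rw [ih _ hlen]
              obtain ⟨hc, hd2⟩ := hcm
              subst hc
              simp [tokenizeB, hq, hb, hd2, renderB]
            · have h1 : goNormA (c :: cs) acc m k = goNormA cs (acc ++ [c]) m k := by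
                simp [goNormA, hq, hb, hcm]
              rw [h1, ih cs (by simp at hcs; omega)]
              simp [tokenizeB, hq, hb, hcm, renderB]

-- ===== VERDICT (by name: the statement is the Claim_ definition above) =====
theorem protect_comment_slash_star_py_spec : Claim_equal_protect_comment_slash_star_py := by
  intro sql _
  show _ = _
  rw [protect_comment_slash_star_py, protect_comment_slash_star_py_alt,
      goNormA_eq sql.toList.length sql.toList (le_refl _)]
  simp
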